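-- pv_equiv track=rewrite | github.com/sofi444/CLE-graph-dependency-parser | tmp/find_cycle_test.py | find_cycle_on_max_heads
-- ===== SOURCE A (Python) =====
-- def find_cycle_on_max_heads(graph:dict):
--     for dep in graph.keys():
--
--         path = []
--         current = dep
--
--         while current not in path:
--
--             if current not in graph.keys():
--                 break #dead end
--
--             path.append(current)
--             current = graph[current]
--
--         else:
--             cycle = path[path.index(current):]
--             return cycle # returns first cycle found
-- ===== SOURCE B (Python) =====
-- def find_cycle_on_max_heads(graph: dict):
--     # Pointer-chasing without path lists: advance n steps to land on a cycle (or
--     # detect a dead end), read off the cycle and its entry, return the rotation.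
--     n = len(graph)
--     for start in graph:
--         # advance n steps; if we ever leave the graph this start dead-ends
--         c = start
--         ok = True
--         for _ in range(n):
--             if c not in graph:
--                 ok = False
--                 break
--             c = graph[c]
--         if not ok or c not in graph:
--             continue
--         # c lies on the cycle; collect the cycle nodes starting at c
--         cyc = [c]
--         x = graph[c]
--         while x != c:
--             cyc.append(x)
--             x = graph[x]
--         members = set(cyc)
--         # entry: first node of the walk from start that lies on the cycle
--         e = start
--         while e not in members:
--             e = graph[e]
--         # rotate so the cycle starts at its entry
--         i = cyc.index(e)
--         return cyc[i:] + cyc[:i]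
--     return None
-- ===== Notes on version B (the rewrite author's own statement) =====
-- stated objective: alternative
-- what changed: A restarts a walk from every key, keeps the whole visited path in a list it re-scans at every step, and cuts the cycle out with path.index; B never stores the walk: it chases the successor pointer n steps to land on the cycle (or hit a dead end), reads the cycle off by following successors until it closes, finds the entry as the first walk node in the cycle set, and returns the rotation starting there.
import Mathlib
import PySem

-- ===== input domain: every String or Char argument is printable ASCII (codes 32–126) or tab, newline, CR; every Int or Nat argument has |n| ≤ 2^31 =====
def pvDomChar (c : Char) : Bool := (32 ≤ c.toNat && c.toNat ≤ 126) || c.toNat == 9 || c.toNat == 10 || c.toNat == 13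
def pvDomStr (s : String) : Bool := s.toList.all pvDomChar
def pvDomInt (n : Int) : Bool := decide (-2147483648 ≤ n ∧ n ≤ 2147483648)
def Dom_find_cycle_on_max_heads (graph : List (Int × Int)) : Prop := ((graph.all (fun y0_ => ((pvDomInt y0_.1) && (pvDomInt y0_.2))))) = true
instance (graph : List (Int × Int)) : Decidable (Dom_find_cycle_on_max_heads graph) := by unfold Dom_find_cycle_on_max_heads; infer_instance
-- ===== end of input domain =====

-- B replaces A's list-scanning walks (a growing path list re-scanned at every step, then
-- path.index to cut out the cycle) by pointer chasing: advance n steps to land on the cycle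
-- (or detect a dead end), read the cycle off by following successors, find its entry, rotate.

-- ===== PORT A =====
-- the inner `while current not in path: …` loop of A; fuel := |keys| + 1 suffices since
-- path holds distinct keys and grows by one each iteration
def pvWalkA (d : PySem.Dict Int Int) : Nat → List Int → Int → Option (List Int)
  | 0, _, _ => none
  | fuel+1, path, current =>
    if current ∈ path then
      -- while-else: cycle = path[path.index(current):]
      some (PySem.List.slice path (some (((PySem.List.index? path current).getD 0 : Nat) : Int)) none)
    else if current ∈ d.keys then
      pvWalkA d fuel (path ++ [current]) (d.getD current 0)
    else none  -- dead end (break); falls through to next key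

-- `for dep in graph.keys(): …` returning the first cycle found
def pvLoopA (d : PySem.Dict Int Int) : List Int → Option (List Int)
  | [] => none
  | dep :: rest =>
    match pvWalkA d (d.keys.length + 1) [] dep with
    | some c => some c
    | none => pvLoopA d rest

def find_cycle_on_max_heads (graph : List (Int × Int)) : Option (List Int) :=
  pvLoopA (PySem.Dict.ofList graph) (PySem.Dict.ofList graph).keys

-- ===== PORT B =====
-- Source B's first inner loop: `for _ in range(steps): if c not in graph: ok = False; break; c = graph[c]`
-- (none = the ok-flag went False)
def pvAdvB (d : PySem.Dict Int Int) : Nat → Int → Option Int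
  | 0, c => some c
  | steps+1, c => if d.contains c then pvAdvB d steps (d.getD c 0) else none

-- Source B's `while x != c: cyc.append(x); x = graph[x]` (fuel n suffices: a cycle has ≤ n nodes)
def pvCollectB (d : PySem.Dict Int Int) : Nat → Int → Int → List Int
  | 0, _, _ => []
  | fuel+1, c, x => if x = c then [] else x :: pvCollectB d fuel c (d.getD x 0)

-- Source B's `while e not in members: e = graph[e]` (fuel n+1 suffices: the entry is ≤ n steps away)
def pvEntryB (d : PySem.Dict Int Int) : Nat → PySem.Set Int → Int → Option Int
  | 0, _, _ => none
  | fuel+1, members, e =>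
    if PySem.Set.contains members e then some e else pvEntryB d fuel members (d.getD e 0)

-- one iteration of Source B's `for start in graph:` body (the `none`s after pvAdvB/contains are the
-- `continue`s; the two `none`s inside are pure fuel guards, unreachable — proved below)
def pvKeyB (d : PySem.Dict Int Int) (start : Int) : Option (List Int) :=
  match pvAdvB d d.keys.length start with
  | none => none
  | some c =>
    if d.contains c then
      let cyc := c :: pvCollectB d d.keys.length c (d.getD c 0)
      match pvEntryB d (d.keys.length + 1) (PySem.Set.ofList cyc) start with
      | none => none
      | some e =>
        match PySem.List.index? cyc e with
        | none => none
        | some i =>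
          some (PySem.List.slice cyc (some (i : Int)) none ++
                PySem.List.slice cyc none (some (i : Int)))
    else none

def pvLoopB (d : PySem.Dict Int Int) : List Int → Option (List Int)
  | [] => none
  | start :: rest =>
    match pvKeyB d start with
    | some r => some r
    | none => pvLoopB d rest

def find_cycle_on_max_heads_alt (graph : List (Int × Int)) : Option (List Int) :=
  pvLoopB (PySem.Dict.ofList graph) (PySem.Dict.ofList graph).keys

-- ===== PRECONDITION & SPEC =====
def Spec_find_cycle_on_max_heads (graph : List (Int × Int)) (out : Option (List Int)) : Prop := out = find_cycle_on_max_heads_alt graph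
instance (graph : List (Int × Int)) (out : Option (List Int)) : Decidable (Spec_find_cycle_on_max_heads graph out) := by unfold Spec_find_cycle_on_max_heads; infer_instance

-- ===== CLAIM (what is proved, stated in full; the proofs are below) =====
def Claim_equal_find_cycle_on_max_heads : Prop := ∀ (graph : List (Int × Int)), Dom_find_cycle_on_max_heads graph → Spec_find_cycle_on_max_heads graph (find_cycle_on_max_heads graph)

-- ===== LEMMAS AND PROOFS =====

-- the successor orbit of `s` under the functional graph `d` (defined via getD, so that it is
-- definitionally the value both ports pass along while all visited nodes are keys)
def pvOrb (d : PySem.Dict Int Int) (s : Int) : Nat → Int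
  | 0 => s
  | m+1 => d.getD (pvOrb d s m) 0

theorem pvOrb_shift (d : PySem.Dict Int Int) (s : Int) (a b : Nat)
    (h : pvOrb d s a = pvOrb d s b) : ∀ k, pvOrb d s (a + k) = pvOrb d s (b + k) := by
  intro k
  induction k with
  | zero => simpa using h
  | succ t ih =>
    show pvOrb d s ((a + t) + 1) = pvOrb d s ((b + t) + 1)
    simp only [pvOrb, ih]

theorem pvOrb_per (d : PySem.Dict Int Int) (s : Int) (a p : Nat)
    (h : pvOrb d s (a + p) = pvOrb d s a) :
    ∀ x, a ≤ x → pvOrb d s (x + p) = pvOrb d s x := by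
  intro x hx
  obtain ⟨t, rfl⟩ := Nat.exists_eq_add_of_le hx
  have := pvOrb_shift d s (a + p) a h t
  calc pvOrb d s (a + t + p) = pvOrb d s (a + p + t) := by ring_nf
    _ = pvOrb d s (a + t) := this

theorem pvOrb_mul (d : PySem.Dict Int Int) (s : Int) (a p : Nat)
    (h : pvOrb d s (a + p) = pvOrb d s a) :
    ∀ x, a ≤ x → ∀ k, pvOrb d s (x + k * p) = pvOrb d s x := by
  intro x hx k
  induction k with
  | zero => simp
  | succ t ih =>
    have : x + (t + 1) * p = (x + t * p) + p := by ring
    rw [this, pvOrb_per d s a p h _ (le_trans hx (Nat.le_add_right _ _)), ih]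

-- a minimal element exists for any inhabited predicate on ℕ (no decidability needed)
theorem pvNatMin (P : Nat → Prop) (k : Nat) (h : P k) : ∃ m, P m ∧ ∀ j, j < m → ¬ P j := by
  induction k using Nat.strong_induction_on with
  | _ k ih =>
    by_cases hb : ∃ j, j < k ∧ P j
    · obtain ⟨j, hj, hP⟩ := hb
      exact ih j hj hP
    · exact ⟨k, h, fun j hj hP => hb ⟨j, hj, hP⟩⟩

-- once the orbit repeats while everything before the repeat is a key, it stays in the keys forever
theorem pvForever (d : PySem.Dict Int Int) (s : Int) (i p : Nat) (hp : 0 < p)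
    (hrep : pvOrb d s (i + p) = pvOrb d s i)
    (hbelow : ∀ v, v < i + p → pvOrb d s v ∈ d.keys) :
    ∀ m, pvOrb d s m ∈ d.keys := by
  intro m
  induction m using Nat.strong_induction_on with
  | _ m ih =>
    by_cases hm : m < i + p
    · exact hbelow m hm
    · have h1 : pvOrb d s m = pvOrb d s (m - p) := by
        have := pvOrb_per d s i p hrep (m - p) (by omega)
        rw [← this]; congr 1; omega
      rw [h1]; exact ih (m - p) (by omega)

-- pigeonhole: n+1 orbit points among n distinct keys must repeat
theorem pvPigeon (d : PySem.Dict Int Int) (s : Int)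
    (h : ∀ m, m ≤ d.keys.length → pvOrb d s m ∈ d.keys) :
    ∃ i j, i < j ∧ j ≤ d.keys.length ∧ pvOrb d s i = pvOrb d s j := by
  have hcard : d.keys.toFinset.card < (Finset.range (d.keys.length + 1)).card := by
    have := List.toFinset_card_le d.keys
    simp only [Finset.card_range]; omega
  have hmaps : ∀ a ∈ Finset.range (d.keys.length + 1), pvOrb d s a ∈ d.keys.toFinset := by
    intro a ha
    simp only [Finset.mem_range] at ha
    simpa using h a (by omega)
  obtain ⟨i, hi, j, hj, hne, heq⟩ :=
    Finset.exists_ne_map_eq_of_card_lt_of_maps_to hcard hmaps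
  simp only [Finset.mem_range] at hi hj
  rcases Nat.lt_or_ge i j with hlt | hge
  · exact ⟨i, j, hlt, by omega, heq⟩
  · exact ⟨j, i, by omega, by omega, heq.symm⟩

-- if the orbit never leaves the keys, it decomposes into a tail of length μ and a cycle of
-- exact period lam, with all of [0, μ+lam) pairwise distinct and μ+lam ≤ n
theorem pvMuLam (d : PySem.Dict Int Int) (s : Int)
    (h : ∀ m, pvOrb d s m ∈ d.keys) :
    ∃ mu lam, 0 < lam ∧ mu + lam ≤ d.keys.length ∧
      pvOrb d s (mu + lam) = pvOrb d s mu ∧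
      ∀ a b, a < mu + lam → b < mu + lam → pvOrb d s a = pvOrb d s b → a = b := by
  obtain ⟨i, j, hij, hjn, heq⟩ := pvPigeon d s (fun m _ => h m)
  have hPi : ∃ p, 0 < p ∧ p ≤ d.keys.length ∧ pvOrb d s (i + p) = pvOrb d s i :=
    ⟨j - i, by omega, by omega, by rw [show i + (j - i) = j by omega]; exact heq.symm⟩
  obtain ⟨mu, hPmu, hminMu⟩ := pvNatMin
    (fun m => ∃ p, 0 < p ∧ p ≤ d.keys.length ∧ pvOrb d s (m + p) = pvOrb d s m) i hPi
  obtain ⟨p0, hp0, hp0n, hrep0⟩ := hPmu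
  obtain ⟨lam, hQ, hminL⟩ := pvNatMin
    (fun p => 0 < p ∧ pvOrb d s (mu + p) = pvOrb d s mu) p0 ⟨hp0, hrep0⟩
  obtain ⟨hl, hper⟩ := hQ
  have hmui : mu ≤ i := by
    by_contra hc
    exact hminMu i (by omega) hPi
  -- lam ≤ j - i, hence mu + lam ≤ j ≤ n
  have hT : 0 < j - i := by omega
  have hrepT : pvOrb d s (i + (j - i)) = pvOrb d s i := by
    rw [show i + (j - i) = j by omega]; exact heq.symm
  have hperT : pvOrb d s (mu + (j - i)) = pvOrb d s mu := by
    have h1 : pvOrb d s (mu + i * p0) = pvOrb d s mu :=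
      pvOrb_mul d s mu p0 hrep0 mu le_rfl i
    have h2 : pvOrb d s ((mu + i * p0) + (j - i)) = pvOrb d s (mu + i * p0) :=
      pvOrb_per d s i (j - i) hrepT (mu + i * p0)
        (le_trans (Nat.le_mul_of_pos_right i hp0) (by omega))
    have h3 : pvOrb d s ((mu + (j - i)) + i * p0) = pvOrb d s (mu + (j - i)) :=
      pvOrb_mul d s mu p0 hrep0 (mu + (j - i)) (by omega) i
    have e : (mu + (j - i)) + i * p0 = (mu + i * p0) + (j - i) := by omega
    rw [← h3, e, h2, h1]
  have hlamT : lam ≤ j - i := by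
    by_contra hc
    exact hminL (j - i) (by omega) ⟨hT, hperT⟩
  refine ⟨mu, lam, hl, by omega, hper, ?_⟩
  -- injectivity on [0, mu + lam)
  have key : ∀ a b, a < b → b < mu + lam → pvOrb d s a = pvOrb d s b → False := by
    intro a b hab hb hab'
    have hrab : pvOrb d s (a + (b - a)) = pvOrb d s a := by
      rw [show a + (b - a) = b by omega]; exact hab'.symm
    have hmua : mu ≤ a := by
      by_contra hc
      exact hminMu a (by omega) ⟨b - a, by omega, by omega, hrab⟩
    have hd : b - a < lam := by omega
    -- show pvOrb d s (mu + (b - a)) = pvOrb d s mu, contradicting minimality of lam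
    have h4 : pvOrb d s ((mu + (b - a)) + a * lam) = pvOrb d s (mu + (b - a)) :=
      pvOrb_mul d s mu lam hper (mu + (b - a)) (by omega) a
    have h5 : pvOrb d s ((mu + a * lam) + (b - a)) = pvOrb d s (mu + a * lam) :=
      pvOrb_per d s a (b - a) hrab (mu + a * lam)
        (le_trans (Nat.le_mul_of_pos_right a hl) (by omega))
    have h6 : pvOrb d s (mu + a * lam) = pvOrb d s mu :=
      pvOrb_mul d s mu lam hper mu le_rfl a
    have e : (mu + (b - a)) + a * lam = (mu + a * lam) + (b - a) := by omega
    have : pvOrb d s (mu + (b - a)) = pvOrb d s mu := by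
      rw [← h4, e, h5, h6]
    exact hminL (b - a) hd ⟨by omega, this⟩
  intro a b ha hb hab
  rcases Nat.lt_trichotomy a b with h' | h' | h'
  · exact absurd (key a b h' hb hab) (fun x => x)
  · exact h'
  · exact absurd (key b a h' ha hab.symm) (fun x => x)

-- first-occurrence index in a mapped range': unique preimage gives the exact position
theorem pvIndexMapRange' (f : Nat → Int) (a N t : Nat) (ht : t < N)
    (huniq : ∀ u, u < N → f (a + u) = f (a + t) → u = t) :
    PySem.List.index? ((List.range' a N).map f) (f (a + t)) = some t := by
  rw [PySem.List.index?_eq_some_iff]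
  refine ⟨(List.range' a t).map f, (List.range' (a + t + 1) (N - t - 1)).map f, ?_, by simp, ?_⟩
  · have h1 : List.range' a N = List.range' a t ++ List.range' (a + t) (N - t) := by
      have := List.range'_append (s := a) (m := t) (n := N - t) (step := 1)
      rw [show a + 1 * t = a + t by omega, show t + (N - t) = N by omega] at this
      exact this.symm
    have h2 : List.range' (a + t) (N - t) = (a + t) :: List.range' (a + t + 1) (N - t - 1) := by
      conv_lhs => rw [show N - t = (N - t - 1) + 1 by omega]
      rw [List.range'_succ]
    rw [h1, h2]
    simp
  · intro hmem
    obtain ⟨m, hm, hfm⟩ := List.mem_map.mp hmem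
    rw [List.mem_range'_1] at hm
    have := huniq (m - a) (by omega) (by rw [show a + (m - a) = m by omega]; exact hfm)
    omega

-- reduction mod lam on the cycle part
theorem pvRed (d : PySem.Dict Int Int) (s : Int) (mu lam : Nat) (hl : 0 < lam)
    (hper : pvOrb d s (mu + lam) = pvOrb d s mu) :
    ∀ u, pvOrb d s (mu + u) = pvOrb d s (mu + u % lam) := by
  intro u
  have h1 : mu + u = (mu + u % lam) + (u / lam) * lam := by
    have := Nat.mod_add_div u lam
    have h2 : u / lam * lam = lam * (u / lam) := Nat.mul_comm _ _
    omega
  rw [h1, pvOrb_mul d s mu lam hper (mu + u % lam) (Nat.le_add_right _ _)]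

theorem pvEqMod (d : PySem.Dict Int Int) (s : Int) (mu lam : Nat) (hl : 0 < lam)
    (hper : pvOrb d s (mu + lam) = pvOrb d s mu)
    (hinj : ∀ a b, a < mu + lam → b < mu + lam → pvOrb d s a = pvOrb d s b → a = b)
    {u v : Nat} (h : pvOrb d s (mu + u) = pvOrb d s (mu + v)) : u % lam = v % lam := by
  have h1 := pvRed d s mu lam hl hper u
  have h2 := pvRed d s mu lam hl hper v
  have := hinj (mu + u % lam) (mu + v % lam)
    (by have := Nat.mod_lt u hl; omega) (by have := Nat.mod_lt v hl; omega)
    (by rw [← h1, ← h2, h])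
  omega

-- ===== A-side characterisations =====

theorem pvWalkA_good (d : PySem.Dict Int Int) (s : Int) (mu lam : Nat)
    (h : ∀ m, pvOrb d s m ∈ d.keys) (hl : 0 < lam)
    (hper : pvOrb d s (mu + lam) = pvOrb d s mu)
    (hinj : ∀ a b, a < mu + lam → b < mu + lam → pvOrb d s a = pvOrb d s b → a = b) :
    ∀ fuel t, t ≤ mu + lam → mu + lam + 1 ≤ fuel + t →
      pvWalkA d fuel ((List.range t).map (pvOrb d s)) (pvOrb d s t) =
        some ((List.range' mu lam).map (pvOrb d s)) := by
  intro fuel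
  induction fuel with
  | zero => intro t ht hf; omega
  | succ fuel ih =>
    intro t ht hf
    rcases Nat.lt_or_ge t (mu + lam) with htl | hge
    · -- still walking: current is fresh, is a key, step
      simp only [pvWalkA]
      rw [if_neg, if_pos (h t)]
      · have hstep : d.getD (pvOrb d s t) 0 = pvOrb d s (t + 1) := rfl
        have hpath : (List.range t).map (pvOrb d s) ++ [pvOrb d s t]
            = (List.range (t + 1)).map (pvOrb d s) := by
          rw [List.range_succ, List.map_append]; rfl
        rw [hstep, hpath]
        exact ih (t + 1) (by omega) (by omega)
      · intro hmem
        obtain ⟨u, hu, hfu⟩ := List.mem_map.mp hmem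
        rw [List.mem_range] at hu
        have := hinj u t (by omega) (by omega) hfu
        omega
    · -- t = mu + lam: current closes the cycle
      have htt : t = mu + lam := by omega
      subst htt
      simp only [pvWalkA]
      rw [if_pos]
      · have hidx : PySem.List.index? ((List.range (mu + lam)).map (pvOrb d s))
            (pvOrb d s (mu + lam)) = some mu := by
          rw [hper, List.range_eq_range']
          have := pvIndexMapRange' (pvOrb d s) 0 (mu + lam) mu (by omega)
            (fun u hu hfu => by
              have := hinj (0 + u) (0 + mu) (by omega) (by omega) hfu
              omega)
          simpa using this
        rw [hidx]
        have hdrop : PySem.List.slice ((List.range (mu + lam)).map (pvOrb d s))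
            (some ((mu : Nat) : Int)) none
            = (List.range' mu lam).map (pvOrb d s) := by
          rw [PySem.List.slice_from_natCast]
          have h1 : List.range (mu + lam) = List.range' 0 mu ++ List.range' mu lam := by
            rw [List.range_eq_range']
            have := List.range'_append (s := 0) (m := mu) (n := lam) (step := 1)
            rw [show 0 + 1 * mu = mu by omega] at this
            rw [← this]
          rw [h1, List.map_append, List.drop_left' (by simp)]
        simp only [Option.getD_some]
        rw [hdrop]
      · rw [hper]
        exact List.mem_map.mpr ⟨mu, List.mem_range.mpr (by omega), rfl⟩

theorem pvWalkA_dead (d : PySem.Dict Int Int) (s : Int) (m0 : Nat)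
    (hesc : pvOrb d s m0 ∉ d.keys) (hmem : ∀ v, v < m0 → pvOrb d s v ∈ d.keys) :
    ∀ fuel t, t ≤ m0 → m0 + 1 ≤ fuel + t →
      pvWalkA d fuel ((List.range t).map (pvOrb d s)) (pvOrb d s t) = none := by
  have hfresh : ∀ t, t ≤ m0 → pvOrb d s t ∉ (List.range t).map (pvOrb d s) := by
    intro t ht hmm
    obtain ⟨u, hu, hfu⟩ := List.mem_map.mp hmm
    rw [List.mem_range] at hu
    -- a repeat before the escape would keep the orbit in the keys forever
    have hall := pvForever d s u (t - u) (by omega)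
      (by rw [show u + (t - u) = t by omega]; exact hfu.symm)
      (fun v hv => hmem v (by omega))
    exact hesc (hall m0)
  intro fuel
  induction fuel with
  | zero => intro t ht hf; omega
  | succ fuel ih =>
    intro t ht hf
    simp only [pvWalkA]
    rw [if_neg (hfresh t ht)]
    rcases Nat.lt_or_ge t m0 with htl | hge
    · rw [if_pos (hmem t htl)]
      have hstep : d.getD (pvOrb d s t) 0 = pvOrb d s (t + 1) := rfl
      have hpath : (List.range t).map (pvOrb d s) ++ [pvOrb d s t]
          = (List.range (t + 1)).map (pvOrb d s) := by
        rw [List.range_succ, List.map_append]; rfl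
      rw [hstep, hpath]
      exact ih (t + 1) (by omega) (by omega)
    · have htt : t = m0 := by omega
      subst htt
      rw [if_neg hesc]

-- ===== B-side characterisations =====

theorem pvAdvB_some (d : PySem.Dict Int Int) (s : Int) :
    ∀ steps t, (∀ u, u < steps → pvOrb d s (t + u) ∈ d.keys) →
      pvAdvB d steps (pvOrb d s t) = some (pvOrb d s (t + steps)) := by
  intro steps
  induction steps with
  | zero => intro t _; rfl
  | succ steps ih =>
    intro t h
    simp only [pvAdvB]
    have hc : d.contains (pvOrb d s t) = true :=
      (PySem.Dict.contains_iff_mem_keys d _).mpr (by simpa using h 0 (by omega))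
    rw [if_pos hc]
    have hstep : d.getD (pvOrb d s t) 0 = pvOrb d s (t + 1) := rfl
    rw [hstep, ih (t + 1) (fun u hu => by
      have := h (u + 1) (by omega)
      rwa [show t + (u + 1) = t + 1 + u by omega] at this)]
    rw [show t + 1 + steps = t + (steps + 1) by omega]

theorem pvAdvB_none (d : PySem.Dict Int Int) (s : Int) :
    ∀ steps t u, u < steps → (∀ v, v < u → pvOrb d s (t + v) ∈ d.keys) →
      pvOrb d s (t + u) ∉ d.keys → pvAdvB d steps (pvOrb d s t) = none := by
  intro steps
  induction steps with
  | zero => intro t u hu _ _; omega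
  | succ steps ih =>
    intro t u hu hbelow hesc
    simp only [pvAdvB]
    cases u with
    | zero =>
      rw [if_neg]
      intro hc
      exact hesc (by simpa using (PySem.Dict.contains_iff_mem_keys d _).mp hc)
    | succ u' =>
      have hc : d.contains (pvOrb d s t) = true :=
        (PySem.Dict.contains_iff_mem_keys d _).mpr (by simpa using hbelow 0 (by omega))
      rw [if_pos hc]
      have hstep : d.getD (pvOrb d s t) 0 = pvOrb d s (t + 1) := rfl
      rw [hstep]
      exact ih (t + 1) u' (by omega)
        (fun v hv => by
          have := hbelow (v + 1) (by omega)
          rwa [show t + (v + 1) = t + 1 + v by omega] at this)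
        (by rwa [show t + 1 + u' = t + (u' + 1) by omega])

theorem pvCollectB_eq (d : PySem.Dict Int Int) (s : Int) (mu lam N : Nat) (hl : 0 < lam)
    (hmuN : mu ≤ N)
    (hper : pvOrb d s (mu + lam) = pvOrb d s mu)
    (hinj : ∀ a b, a < mu + lam → b < mu + lam → pvOrb d s a = pvOrb d s b → a = b) :
    ∀ fuel s', 1 ≤ s' → s' ≤ lam → lam ≤ fuel + s' →
      pvCollectB d fuel (pvOrb d s N) (pvOrb d s (N + s')) =
        (List.range' (N + s') (lam - s')).map (pvOrb d s) := by
  intro fuel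
  induction fuel with
  | zero =>
    intro s' h1 h2 h3
    have : s' = lam := by omega
    subst this
    simp [pvCollectB]
  | succ fuel ih =>
    intro s' h1 h2 h3
    simp only [pvCollectB]
    rcases Nat.lt_or_ge s' lam with hs | hs
    · rw [if_neg]
      · have hstep : d.getD (pvOrb d s (N + s')) 0 = pvOrb d s (N + s' + 1) := rfl
        rw [hstep]
        have := ih (s' + 1) (by omega) (by omega) (by omega)
        rw [show N + (s' + 1) = N + s' + 1 by omega] at this
        rw [this]
        rw [show lam - s' = (lam - s' - 1) + 1 by omega, List.range'_succ]
        simp only [List.map_cons]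
        rw [show lam - s' - 1 = lam - (s' + 1) by omega]
      · intro hcontra
        have e1 : pvOrb d s (mu + ((N - mu) + s')) = pvOrb d s (mu + (N - mu)) := by
          rw [show mu + ((N - mu) + s') = N + s' by omega, show mu + (N - mu) = N by omega]
          exact hcontra
        have hm := pvEqMod d s mu lam hl hper hinj e1
        have hme : Nat.ModEq lam ((N - mu) + s') ((N - mu) + 0) := by
          show ((N - mu) + s') % lam = ((N - mu) + 0) % lam
          simpa using hm
        have : s' % lam = 0 % lam := Nat.ModEq.add_left_cancel' (N - mu) hme
        rw [Nat.zero_mod, Nat.mod_eq_of_lt hs] at this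
        omega
    · have hsl : s' = lam := by omega
      rw [hsl, if_pos (pvOrb_per d s mu lam hper N hmuN)]
      simp

theorem pvEntryB_eq (d : PySem.Dict Int Int) (s : Int) (mu : Nat)
    (members : PySem.Set Int)
    (hmu : pvOrb d s mu ∈ members) (hlt : ∀ t, t < mu → pvOrb d s t ∉ members) :
    ∀ fuel t, t ≤ mu → mu + 1 ≤ fuel + t →
      pvEntryB d fuel members (pvOrb d s t) = some (pvOrb d s mu) := by
  intro fuel
  induction fuel with
  | zero => intro t ht hf; omega
  | succ fuel ih =>
    intro t ht hf
    simp only [pvEntryB]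
    rcases Nat.lt_or_ge t mu with htl | hge
    · rw [if_neg]
      · have hstep : d.getD (pvOrb d s t) 0 = pvOrb d s (t + 1) := rfl
        rw [hstep]
        exact ih (t + 1) (by omega) (by omega)
      · intro hc
        exact hlt t htl ((PySem.Set.contains_iff members _).mp hc)
    · have htt : t = mu := by omega
      subst htt
      rw [if_pos ((PySem.Set.contains_iff members _).mpr hmu)]

-- the entry pvOrb mu appears on the collected cycle, at a unique offset s0
theorem pvS0 (d : PySem.Dict Int Int) (s : Int) (mu lam N : Nat) (hl : 0 < lam)
    (hmuN : mu ≤ N) (hper : pvOrb d s (mu + lam) = pvOrb d s mu) :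
    ∃ s0, s0 < lam ∧ pvOrb d s (N + s0) = pvOrb d s mu := by
  have hred : ∀ u, pvOrb d s (mu + u) = pvOrb d s (mu + u % lam) := pvRed d s mu lam hl hper
  by_cases hw : (N - mu) % lam = 0
  · refine ⟨0, hl, ?_⟩
    have h1 := hred (N - mu)
    rw [show mu + (N - mu) = N by omega, hw] at h1
    simpa using h1
  · refine ⟨lam - (N - mu) % lam, by have := Nat.mod_lt (N - mu) hl; omega, ?_⟩
    have h1 := hred ((N - mu) + (lam - (N - mu) % lam))
    rw [show mu + ((N - mu) + (lam - (N - mu) % lam)) = N + (lam - (N - mu) % lam) by omega] at h1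
    have hq := Nat.div_add_mod (N - mu) lam
    have hwlt : (N - mu) % lam < lam := Nat.mod_lt _ hl
    have e : (N - mu) + (lam - (N - mu) % lam) = lam * ((N - mu) / lam) + lam := by omega
    have e2 : lam * ((N - mu) / lam) + lam = lam * ((N - mu) / lam + 1) := by ring
    rw [e, e2, Nat.mul_mod_right] at h1
    simpa using h1

theorem pvS0uniq (d : PySem.Dict Int Int) (s : Int) (mu lam N : Nat) (hl : 0 < lam)
    (hmuN : mu ≤ N) (hper : pvOrb d s (mu + lam) = pvOrb d s mu)
    (hinj : ∀ a b, a < mu + lam → b < mu + lam → pvOrb d s a = pvOrb d s b → a = b) :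
    ∀ u v, u < lam → v < lam → pvOrb d s (N + u) = pvOrb d s (N + v) → u = v := by
  intro u v hu hv he
  have e1 : pvOrb d s (mu + ((N - mu) + u)) = pvOrb d s (mu + ((N - mu) + v)) := by
    rw [show mu + ((N - mu) + u) = N + u by omega, show mu + ((N - mu) + v) = N + v by omega]
    exact he
  have hm := pvEqMod d s mu lam hl hper hinj e1
  have hme : Nat.ModEq lam ((N - mu) + u) ((N - mu) + v) := hm
  have := Nat.ModEq.add_left_cancel' (N - mu) hme
  have h2 : u % lam = v % lam := this
  rwa [Nat.mod_eq_of_lt hu, Nat.mod_eq_of_lt hv] at h2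

-- rotating the collected cycle to start at the entry gives exactly A's slice
theorem pvRotate (d : PySem.Dict Int Int) (s : Int) (mu lam N s0 : Nat) (hl : 0 < lam)
    (hmuN : mu ≤ N) (hper : pvOrb d s (mu + lam) = pvOrb d s mu) (hs0 : s0 < lam)
    (he : pvOrb d s (N + s0) = pvOrb d s mu) :
    (List.range' (N + s0) (lam - s0)).map (pvOrb d s) ++ (List.range' N s0).map (pvOrb d s)
      = (List.range' mu lam).map (pvOrb d s) := by
  apply List.ext_getElem
  · simp only [List.length_append, List.length_map, List.length_range']
    omega
  intro p hp1 hp2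
  simp only [List.length_append, List.length_map, List.length_range'] at hp1
  rw [List.getElem_append]
  split
  · rename_i hcase
    simp only [List.length_map, List.length_range'] at hcase
    simp only [List.getElem_map, List.getElem_range', one_mul]
    exact pvOrb_shift d s (N + s0) mu he p
  · rename_i hcase
    simp only [List.length_map, List.length_range'] at hcase
    simp only [List.getElem_map, List.getElem_range', List.length_map,
      List.length_range', one_mul]
    have hk := pvOrb_shift d s (N + s0) mu he ((p - (lam - s0)) + (lam - s0))
    rw [show N + s0 + ((p - (lam - s0)) + (lam - s0)) = (N + (p - (lam - s0))) + lam by omega,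
        show mu + ((p - (lam - s0)) + (lam - s0)) = mu + p by omega] at hk
    rw [← pvOrb_per d s mu lam hper (N + (p - (lam - s0))) (by omega)]
    exact hk

-- ===== per-key equivalence and the loop =====

theorem pvKey_good (d : PySem.Dict Int Int) (s : Int)
    (h : ∀ m, pvOrb d s m ∈ d.keys) :
    ∃ r, pvWalkA d (d.keys.length + 1) [] s = some r ∧ pvKeyB d s = some r := by
  obtain ⟨mu, lam, hl, hle, hper, hinj⟩ := pvMuLam d s h
  have hmun : mu ≤ d.keys.length := by omega
  refine ⟨(List.range' mu lam).map (pvOrb d s), ?_, ?_⟩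
  · exact pvWalkA_good d s mu lam h hl hper hinj (d.keys.length + 1) 0 (by omega) (by omega)
  · unfold pvKeyB
    have hadv : pvAdvB d d.keys.length s = some (pvOrb d s d.keys.length) := by
      have := pvAdvB_some d s d.keys.length 0 (fun u _ => by simpa using h u)
      simpa using this
    simp only [hadv]
    have hcn : d.contains (pvOrb d s d.keys.length) = true :=
      (PySem.Dict.contains_iff_mem_keys d _).mpr (h _)
    simp only [hcn, if_true]
    have hcyc : pvOrb d s d.keys.length
          :: pvCollectB d d.keys.length (pvOrb d s d.keys.length)
            (d.getD (pvOrb d s d.keys.length) 0)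
        = (List.range' d.keys.length lam).map (pvOrb d s) := by
      have hg : d.getD (pvOrb d s d.keys.length) 0 = pvOrb d s (d.keys.length + 1) := rfl
      rw [hg, pvCollectB_eq d s mu lam d.keys.length hl hmun hper hinj
        d.keys.length 1 le_rfl hl (by omega)]
      conv_rhs => rw [show lam = (lam - 1) + 1 by omega, List.range'_succ]
      simp
    simp only [hcyc]
    obtain ⟨s0, hs0, hes0⟩ := pvS0 d s mu lam d.keys.length hl hmun hper
    have hment : pvOrb d s mu ∈ PySem.Set.ofList ((List.range' d.keys.length lam).map (pvOrb d s)) := by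
      rw [PySem.Set.mem_ofList]
      exact List.mem_map.mpr ⟨d.keys.length + s0,
        List.mem_range'_1.mpr ⟨Nat.le_add_right _ _, by omega⟩, hes0⟩
    have hnot : ∀ t, t < mu →
        pvOrb d s t ∉ PySem.Set.ofList ((List.range' d.keys.length lam).map (pvOrb d s)) := by
      intro t ht hmem
      rw [PySem.Set.mem_ofList] at hmem
      obtain ⟨m, hm, hfm⟩ := List.mem_map.mp hmem
      rw [List.mem_range'_1] at hm
      have hred := pvRed d s mu lam hl hper (m - mu)
      rw [show mu + (m - mu) = m by omega] at hred
      have := hinj t (mu + (m - mu) % lam) (by omega)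
        (by have := Nat.mod_lt (m - mu) hl; omega)
        (by rw [← hred]; exact hfm.symm)
      omega
    have hentry := pvEntryB_eq d s mu _ hment hnot (d.keys.length + 1) 0 (by omega) (by omega)
    have hentry' : pvEntryB d (d.keys.length + 1)
        (PySem.Set.ofList ((List.range' d.keys.length lam).map (pvOrb d s))) s
        = some (pvOrb d s mu) := hentry
    simp only [hentry']
    have hidx : PySem.List.index? ((List.range' d.keys.length lam).map (pvOrb d s))
        (pvOrb d s mu) = some s0 := by
      rw [← hes0]
      exact pvIndexMapRange' (pvOrb d s) d.keys.length lam s0 hs0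
        (fun u hu hfu => pvS0uniq d s mu lam d.keys.length hl hmun hper hinj u s0 hu hs0 hfu)
    simp only [hidx]
    rw [PySem.List.slice_from_natCast, PySem.List.slice_to_natCast]
    have hsplit : List.range' d.keys.length lam
        = List.range' d.keys.length s0 ++ List.range' (d.keys.length + s0) (lam - s0) := by
      have := List.range'_append (s := d.keys.length) (m := s0) (n := lam - s0) (step := 1)
      rw [show d.keys.length + 1 * s0 = d.keys.length + s0 by omega,
        show s0 + (lam - s0) = lam by omega] at this
      exact this.symm
    rw [hsplit, List.map_append, List.drop_left' (by simp), List.take_left' (by simp),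
      pvRotate d s mu lam d.keys.length s0 hl hmun hper hs0 hes0]

theorem pvKey_dead (d : PySem.Dict Int Int) (s : Int)
    (h : ¬ ∀ m, pvOrb d s m ∈ d.keys) :
    pvWalkA d (d.keys.length + 1) [] s = none ∧ pvKeyB d s = none := by
  push_neg at h
  obtain ⟨m1, hm1⟩ := h
  obtain ⟨m0, hP0, hmin⟩ := pvNatMin (fun m => pvOrb d s m ∉ d.keys) m1 hm1
  have hmem : ∀ v, v < m0 → pvOrb d s v ∈ d.keys := by
    intro v hv
    by_contra hc
    exact hmin v hv hc
  have hm0n : m0 ≤ d.keys.length := by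
    by_contra hgt
    obtain ⟨i, j, hij, hjn, heq⟩ := pvPigeon d s (fun m hm => hmem m (by omega))
    have hall := pvForever d s i (j - i) (by omega)
      (by rw [show i + (j - i) = j by omega]; exact heq.symm)
      (fun v hv => hmem v (by omega))
    exact hP0 (hall m0)
  constructor
  · exact pvWalkA_dead d s m0 hP0 hmem (d.keys.length + 1) 0 (by omega) (by omega)
  · unfold pvKeyB
    rcases Nat.lt_or_ge m0 d.keys.length with hcase | hcase
    · have hadv : pvAdvB d d.keys.length s = none := by
        have := pvAdvB_none d s d.keys.length 0 m0 hcase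
          (fun v hv => by simpa using hmem v hv) (by simpa using hP0)
        simpa using this
      simp only [hadv]
    · have hm0 : m0 = d.keys.length := by omega
      have hadv : pvAdvB d d.keys.length s = some (pvOrb d s d.keys.length) := by
        have := pvAdvB_some d s d.keys.length 0
          (fun u hu => by simpa using hmem u (by omega))
        simpa using this
      simp only [hadv]
      have hcn : d.contains (pvOrb d s d.keys.length) = false := by
        cases hcc : d.contains (pvOrb d s d.keys.length)
        · rfl
        · exact absurd ((PySem.Dict.contains_iff_mem_keys d _).mp hcc) (hm0 ▸ hP0)
      simp only [hcn, if_false]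
      rfl

theorem pvLoop_eq (d : PySem.Dict Int Int) :
    ∀ ks : List Int, pvLoopA d ks = pvLoopB d ks := by
  intro ks
  induction ks with
  | nil => rfl
  | cons k rest ih =>
    simp only [pvLoopA, pvLoopB]
    by_cases h : ∀ m, pvOrb d k m ∈ d.keys
    · obtain ⟨r, hA, hB⟩ := pvKey_good d k h
      rw [hA, hB]
    · obtain ⟨hA, hB⟩ := pvKey_dead d k h
      rw [hA, hB]
      exact ih

-- ===== VERDICT (by name: the statement is the Claim_ definition above) =====
theorem find_cycle_on_max_heads_spec : Claim_equal_find_cycle_on_max_heads := by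
  intro graph _
  unfold Spec_find_cycle_on_max_heads find_cycle_on_max_heads find_cycle_on_max_heads_alt
  exact pvLoop_eq _ _
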